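-- pv_equiv track=rewrite | github.com/brms2021/tabflow.ai | training/ingest_guitarset.py | _find_best_string_fret
-- ===== SOURCE A (Python) =====
-- STANDARD_TUNING = [40, 45, 50, 55, 59, 64]
--
-- def _find_best_string_fret(midi_pitch: int) -> tuple[int | None, int]:
--     """Find the most natural (string, fret) for a given MIDI pitch."""
--     best_string = None
--     best_fret = 999
--
--     for s, open_pitch in enumerate(STANDARD_TUNING):
--         fret = midi_pitch - open_pitch
--         if 0 <= fret <= 24:
--             # Prefer lower fret positions
--             if fret < best_fret:
--                 best_fret = fret
--                 best_string = s
--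
--     return best_string, best_fret
-- ===== SOURCE B (Python) =====
-- STANDARD_TUNING = [40, 45, 50, 55, 59, 64]
--
-- def _find_best_string_fret(midi_pitch: int) -> tuple[int | None, int]:
--     """Binary search the sorted tuning for the largest open pitch <= midi_pitch:
--     that string carries the smallest non-negative fret."""
--     lo, hi = 0, len(STANDARD_TUNING)
--     while lo < hi:
--         mid = (lo + hi) // 2
--         if midi_pitch < STANDARD_TUNING[mid]:
--             hi = mid
--         else:
--             lo = mid + 1
--     idx = lo - 1
--     if idx >= 0:
--         fret = midi_pitch - STANDARD_TUNING[idx]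
--         if fret <= 24:
--             return idx, fret
--     return None, 999
-- ===== Notes on version B (the rewrite author's own statement) =====
-- stated objective: idiomatic
-- what changed: Replaces the linear min-tracking scan over all six strings by a binary search (hand-written bisect_right) for the largest open pitch not exceeding midi_pitch, which is the unique minimal-fret candidate since the tuning is sorted ascending.
import Mathlib
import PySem

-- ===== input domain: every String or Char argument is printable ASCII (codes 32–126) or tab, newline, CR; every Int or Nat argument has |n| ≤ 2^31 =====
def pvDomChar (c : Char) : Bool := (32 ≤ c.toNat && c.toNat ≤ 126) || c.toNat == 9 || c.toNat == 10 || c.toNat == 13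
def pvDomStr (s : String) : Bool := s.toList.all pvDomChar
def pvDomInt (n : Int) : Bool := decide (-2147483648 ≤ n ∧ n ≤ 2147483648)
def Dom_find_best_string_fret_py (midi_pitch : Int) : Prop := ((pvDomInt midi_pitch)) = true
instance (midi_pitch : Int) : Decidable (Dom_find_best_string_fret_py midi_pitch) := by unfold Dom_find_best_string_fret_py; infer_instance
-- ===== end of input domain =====

-- B replaces A's linear min-tracking scan over the tuning with a hand-written binary search
-- (bisect_right) for the largest open pitch ≤ midi_pitch (idiomatic; same exact results).


-- ===== PORT A =====
def STANDARD_TUNING : List Int := [40, 45, 50, 55, 59, 64]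

def find_best_string_fret_py (midi_pitch : Int) : Option Int × Int :=
  (PySem.List.enumerate STANDARD_TUNING).foldl
    (fun best (p : Int × Int) =>
      let fret := midi_pitch - p.2
      if 0 ≤ fret ∧ fret ≤ 24 then
        if fret < best.2 then (some p.1, fret) else best
      else best)
    (none, 999)

-- ===== PORT B =====
-- the while loop of Source B, with fuel (the loop runs at most 3 iterations on a 6-element list);
-- index `mid` is always in range, so getD is exact
def bisectLoop : Nat → Int → Nat → Nat → Nat
  | 0, _, lo, _ => lo
  | f + 1, x, lo, hi =>
    if lo < hi then
      let mid := (lo + hi) / 2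
      if x < STANDARD_TUNING.getD mid 0 then bisectLoop f x lo mid
      else bisectLoop f x (mid + 1) hi
    else lo

def find_best_string_fret_py_alt (midi_pitch : Int) : Option Int × Int :=
  let lo := bisectLoop 8 midi_pitch 0 STANDARD_TUNING.length
  let idx : Int := (lo : Int) - 1
  if 0 ≤ idx then
    let fret := midi_pitch - STANDARD_TUNING.getD idx.toNat 0
    if fret ≤ 24 then (some idx, fret) else (none, 999)
  else (none, 999)

-- ===== PRECONDITION & SPEC =====
def Spec_find_best_string_fret_py (midi_pitch : Int) (out : Option Int × Int) : Prop := out = find_best_string_fret_py_alt midi_pitch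
instance (midi_pitch : Int) (out : Option Int × Int) : Decidable (Spec_find_best_string_fret_py midi_pitch out) := by unfold Spec_find_best_string_fret_py; infer_instance

-- ===== CLAIM (what is proved, stated in full; the proofs are below) =====
def Claim_equal_find_best_string_fret_py : Prop := ∀ (midi_pitch : Int), Dom_find_best_string_fret_py midi_pitch → Spec_find_best_string_fret_py midi_pitch (find_best_string_fret_py midi_pitch)

-- ===== LEMMAS AND PROOFS =====

-- ===== VERDICT (by name: the statement is the Claim_ definition above) =====
theorem find_best_string_fret_py_spec : Claim_equal_find_best_string_fret_py := by
  intro m hD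
  have hB : -2147483648 ≤ m ∧ m ≤ 2147483648 := by
    simpa [Dom_find_best_string_fret_py, pvDomInt] using hD
  obtain ⟨hB1, hB2⟩ := hB
  unfold Spec_find_best_string_fret_py
  rcases lt_or_ge m 40 with h | h
  · -- m < 40: no string matches, bisect lands at lo = 0
    have hb : bisectLoop 8 m 0 6 = 0 := by
      norm_num [bisectLoop, STANDARD_TUNING,
        show m < 55 from by omega, show m < 45 from by omega, show m < 40 from by omega]
    simp only [find_best_string_fret_py, find_best_string_fret_py_alt,
      STANDARD_TUNING, PySem.List.enumerate_cons, PySem.List.enumerate_nil, List.foldl,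
      (show ¬(0 ≤ m - 40) from by omega), (show ¬(0 ≤ m - 45) from by omega),
      (show ¬(0 ≤ m - 50) from by omega), (show ¬(0 ≤ m - 55) from by omega),
      (show ¬(0 ≤ m - 59) from by omega), (show ¬(0 ≤ m - 64) from by omega),
      false_and, ite_false]
    norm_num [hb, List.length_cons, List.length_nil]
  · rcases lt_or_ge m 89 with h2 | h2
    · -- 40 ≤ m ≤ 88: finitely many pitches, check each one
      interval_cases m <;> decide
    · -- m > 88: every fret exceeds 24, bisect lands at lo = 6
      have hb : bisectLoop 8 m 0 6 = 6 := by
        norm_num [bisectLoop, STANDARD_TUNING,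
          show ¬ m < 55 from by omega, show ¬ m < 64 from by omega, show ¬ m < 59 from by omega]
      simp only [find_best_string_fret_py, find_best_string_fret_py_alt,
        STANDARD_TUNING, PySem.List.enumerate_cons, PySem.List.enumerate_nil, List.foldl,
        (show ¬(m - 40 ≤ 24) from by omega), (show ¬(m - 45 ≤ 24) from by omega),
        (show ¬(m - 50 ≤ 24) from by omega), (show ¬(m - 55 ≤ 24) from by omega),
        (show ¬(m - 59 ≤ 24) from by omega), (show ¬(m - 64 ≤ 24) from by omega),
        and_false, ite_false]
      norm_num [hb, List.length_cons, List.length_nil, List.getD,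
        show ¬ m - 64 ≤ 24 from by omega]
      intro hc
      rw [show ([40, 45, 50, 55, 59, 64] : List Int)[Int.toNat 5] = 64 from rfl] at hc
      omega
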